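-- pv_equiv track=rewrite | github.com/sovyx-ai/sovyx | tests/integration/test_self_diagnosis.py | _step_outcomes
-- ===== SOURCE A (Python) =====
-- from typing import Any
--
-- _EXPECTED_STEP_NAMES: tuple[str, ...] = (
--     "startup.platform",
--     "startup.hardware",
--     "startup.audio.devices",
--     "startup.audio.apo_scan",
--     "startup.network",
--     "startup.filesystem",
--     "startup.models",
--     "startup.config.provenance",
--     "startup.health.snapshot",
-- )
--
-- def _step_outcomes(records: list[dict[str, Any]]) -> dict[str, str]:
--     """Map each expected step name → "ok" | "failed" | "missing"."""
--     outcomes: dict[str, str] = dict.fromkeys(_EXPECTED_STEP_NAMES, "missing")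
--     for rec in records:
--         event = rec.get("event")
--         if event in outcomes:
--             outcomes[event] = "ok"
--         elif event == "startup.step.failed":
--             step = rec.get("startup.step")
--             if isinstance(step, str) and step in outcomes:
--                 outcomes[step] = "failed"
--     return outcomes
-- ===== SOURCE B (Python) =====
-- _EXPECTED_STEP_NAMES: tuple[str, ...] = (
--     "startup.platform",
--     "startup.hardware",
--     "startup.audio.devices",
--     "startup.audio.apo_scan",
--     "startup.network",
--     "startup.filesystem",
--     "startup.models",
--     "startup.config.provenance",
--     "startup.health.snapshot",
-- )
--
-- def _step_outcomes(records):
--     """Map each expected step name -> "ok" | "failed" | "missing".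
--
--     Per-name backward scan with early exit: the latest relevant record wins,
--     so scanning from the end and returning at the first hit reproduces the
--     last-write-wins semantics without mutating a shared dict.
--     """
--     def outcome(name):
--         for rec in reversed(records):
--             event = rec.get("event")
--             if event == name:
--                 return "ok"
--             if event == "startup.step.failed" and rec.get("startup.step") == name:
--                 return "failed"
--         return "missing"
--     return {name: outcome(name) for name in _EXPECTED_STEP_NAMES}
-- ===== Notes on version B (the rewrite author's own statement) =====
-- stated objective: alternative
-- what changed: Replaces A's single forward pass mutating a shared dict (last write wins) by an independent per-name backward scan with early exit (first hit from the end wins), building the result as a comprehension over the expected names.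
import Mathlib
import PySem

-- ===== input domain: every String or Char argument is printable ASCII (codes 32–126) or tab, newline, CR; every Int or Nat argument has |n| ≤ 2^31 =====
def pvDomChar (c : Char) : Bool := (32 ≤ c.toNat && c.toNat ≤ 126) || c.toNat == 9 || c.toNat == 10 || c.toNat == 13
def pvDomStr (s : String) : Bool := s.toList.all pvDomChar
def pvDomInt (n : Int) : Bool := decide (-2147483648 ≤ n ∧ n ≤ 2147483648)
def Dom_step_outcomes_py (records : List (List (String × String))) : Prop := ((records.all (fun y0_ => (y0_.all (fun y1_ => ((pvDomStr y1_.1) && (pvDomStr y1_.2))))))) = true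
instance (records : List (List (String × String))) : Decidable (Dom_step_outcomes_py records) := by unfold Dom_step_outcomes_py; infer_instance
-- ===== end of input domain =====

-- B replaces A's forward pass over a mutated dict by a per-name backward scan with early exit
-- (first hit from the end = last write); same results, same asymptotic cost.

-- ===== PORT A =====
-- _EXPECTED_STEP_NAMES
def expectedStepNames : List String :=
  ["startup.platform", "startup.hardware", "startup.audio.devices",
   "startup.audio.apo_scan", "startup.network", "startup.filesystem",
   "startup.models", "startup.config.provenance", "startup.health.snapshot"]

-- rec.get(k): first-match lookup in the association list (the dict convention)
def recGet (rec : List (String × String)) (k : String) : Option String :=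
  List.lookup k rec

-- the body of A's for-loop (rec.get("event") is None ⇒ neither branch fires;
-- values are Strings under the type convention, so isinstance(step, str) is always true)
def stepA (d : PySem.Dict String String) (rec : List (String × String)) :
    PySem.Dict String String :=
  match recGet rec "event" with
  | none => d
  | some e =>
    if d.contains e then d.insert e "ok"
    else if e = "startup.step.failed" then
      match recGet rec "startup.step" with
      | none => d
      | some s => if d.contains s then d.insert s "failed" else d
    else d

def step_outcomes_py (records : List (List (String × String))) : List (String × String) :=
  (records.foldl stepA
    (PySem.Dict.ofList (expectedStepNames.map (fun n => (n, "missing"))))).items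

-- ===== PORT B =====
-- B's inner `outcome(name)`: scan reversed(records), early return at the first hit
def outcomeB (name : String) : List (List (String × String)) → String
  | [] => "missing"
  | rec :: rest =>
    if recGet rec "event" = some name then "ok"
    else if recGet rec "event" = some "startup.step.failed" ∧
            recGet rec "startup.step" = some name then "failed"
    else outcomeB name rest

def step_outcomes_py_alt (records : List (List (String × String))) : List (String × String) :=
  expectedStepNames.map (fun n => (n, outcomeB n records.reverse))

-- ===== PRECONDITION & SPEC =====
def Spec_step_outcomes_py (records : List (List (String × String))) (out : List (String × String)) : Prop := out = step_outcomes_py_alt records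
instance (records : List (List (String × String))) (out : List (String × String)) : Decidable (Spec_step_outcomes_py records out) := by unfold Spec_step_outcomes_py; infer_instance

-- ===== CLAIM (what is proved, stated in full; the proofs are below) =====
def Claim_equal_step_outcomes_py : Prop := ∀ (records : List (List (String × String))), Dom_step_outcomes_py records → Spec_step_outcomes_py records (step_outcomes_py records)

-- ===== LEMMAS AND PROOFS =====

-- what one record contributes to the key k: some "ok" / some "failed" / none
def hitVal (k : String) (rec : List (String × String)) : Option String :=
  if recGet rec "event" = some k then some "ok"
  else if recGet rec "event" = some "startup.step.failed" ∧
          recGet rec "startup.step" = some k then some "failed"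
  else none

-- A's per-key value transition, key presence abstracted to membership in expectedStepNames
def stepVal (k : String) (v : String) (rec : List (String × String)) : String :=
  match recGet rec "event" with
  | none => v
  | some e =>
    if e ∈ expectedStepNames then (if k = e then "ok" else v)
    else if e = "startup.step.failed" then
      match recGet rec "startup.step" with
      | none => v
      | some s => if s ∈ expectedStepNames then (if k = s then "failed" else v) else v
    else v

lemma nodup_expected : expectedStepNames.Nodup := by
  simp [expectedStepNames]

lemma init_eq :
    PySem.Dict.ofList (expectedStepNames.map (fun n => (n, "missing")))
      = PySem.Dict.mk (expectedStepNames.map (fun n => (n, "missing"))) := by rfl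

lemma getD_init (k : String) :
    (PySem.Dict.ofList (expectedStepNames.map (fun n => (n, "missing")))).getD k "missing"
      = "missing" := by
  rw [init_eq]
  simp only [PySem.Dict.getD_eq_get?_getD, expectedStepNames, List.map_cons, List.map_nil,
    PySem.Dict.get?_mk_cons]
  split_ifs <;> rfl

lemma keys_init :
    (PySem.Dict.ofList (expectedStepNames.map (fun n => (n, "missing")))).keys
      = expectedStepNames := by
  rw [init_eq]
  simp [PySem.Dict.keys_mk, expectedStepNames]

lemma keys_stepA (d : PySem.Dict String String) (rec : List (String × String)) :
    (stepA d rec).keys = d.keys := by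
  unfold stepA
  cases recGet rec "event" with
  | none => rfl
  | some e =>
    by_cases he : d.contains e = true
    · simp [he, PySem.Dict.keys_insert_of_contains d _ he]
    · simp only [he]
      by_cases hef : e = "startup.step.failed"
      · simp only [hef, if_true]
        cases recGet rec "startup.step" with
        | none => simp
        | some s =>
          by_cases hs : d.contains s = true
          · simp [hs, PySem.Dict.keys_insert_of_contains d _ hs]
          · simp [hs]
      · simp [hef]

lemma getD_stepA (d : PySem.Dict String String)
    (hInv : d.keys = expectedStepNames) (rec : List (String × String)) (k : String) :
    (stepA d rec).getD k "missing" = stepVal k (d.getD k "missing") rec := by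
  have hcont : ∀ x, d.contains x = decide (x ∈ expectedStepNames) := by
    intro x
    rw [PySem.Dict.contains_eq_decide_mem_keys, hInv]
  unfold stepA stepVal
  cases recGet rec "event" with
  | none => rfl
  | some e =>
    dsimp only
    rw [hcont e]
    by_cases he : e ∈ expectedStepNames
    · simp [he, PySem.Dict.getD_insert]
    · simp only [he, decide_false, if_false, Bool.false_eq_true]
      by_cases hef : e = "startup.step.failed"
      · simp only [hef, if_true]
        cases recGet rec "startup.step" with
        | none => rfl
        | some s =>
          dsimp only
          rw [hcont s]
          by_cases hs : s ∈ expectedStepNames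
          · simp [hs, PySem.Dict.getD_insert]
          · simp [hs]
      · simp [hef]

lemma foldl_stepA (records : List (List (String × String)))
    (d : PySem.Dict String String) (hInv : d.keys = expectedStepNames) :
    (records.foldl stepA d).items =
      expectedStepNames.map (fun k => (k, records.foldl (stepVal k) (d.getD k "missing"))) := by
  induction records generalizing d with
  | nil =>
    simpa [hInv] using PySem.Dict.items_eq_map_keys d (hInv ▸ nodup_expected) "missing"
  | cons rec rest ih =>
    have hInv' : (stepA d rec).keys = expectedStepNames := (keys_stepA d rec).trans hInv
    simp only [List.foldl_cons, ih (stepA d rec) hInv']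
    exact List.map_congr_left (fun k _ => by rw [getD_stepA d hInv rec k])

lemma stepVal_eq_hit (k : String) (hk : k ∈ expectedStepNames)
    (v : String) (rec : List (String × String)) :
    stepVal k v rec = (hitVal k rec).getD v := by
  have hnf : ("startup.step.failed" : String) ∉ expectedStepNames := by
    simp [expectedStepNames]
  have hfk : ¬ (("startup.step.failed" : String) = k) := fun h => hnf (h ▸ hk)
  unfold stepVal hitVal
  cases hev : recGet rec "event" with
  | none => simp
  | some e =>
    dsimp only
    by_cases hke : k = e
    · subst hke
      simp [hk]
    · have hek : ¬ ((e : String) = k) := fun h => hke h.symm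
      by_cases hef : e = "startup.step.failed"
      · subst hef
        cases hst : recGet rec "startup.step" with
        | none => simp [hnf, hfk]
        | some s =>
          by_cases hks : k = s
          · subst hks
            simp [hnf, hfk, hk]
          · have hsk : ¬ ((s : String) = k) := fun h => hks h.symm
            simp [hnf, hfk, hsk]
            exact fun _ h => absurd h hks
      · by_cases he : e ∈ expectedStepNames
        · simp [he, hke, hek, hef]
        · simp [he, hek, hef]

lemma outcomeB_foldr (k : String) (l : List (List (String × String))) :
    outcomeB k l = l.foldr (fun rec acc => (hitVal k rec).getD acc) "missing" := by
  induction l with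
  | nil => rfl
  | cons rec rest ih =>
    rw [List.foldr_cons]
    unfold outcomeB hitVal
    split_ifs <;> simp [ih, hitVal]

-- ===== VERDICT (by name: the statement is the Claim_ definition above) =====
theorem step_outcomes_py_spec : Claim_equal_step_outcomes_py := by
  intro records _
  show step_outcomes_py records = step_outcomes_py_alt records
  unfold step_outcomes_py step_outcomes_py_alt
  rw [foldl_stepA records _ keys_init]
  refine List.map_congr_left (fun k hk => ?_)
  rw [getD_init k, outcomeB_foldr, List.foldr_reverse]
  have h : stepVal k = fun v rec => (hitVal k rec).getD v :=
    funext fun v => funext fun rec => stepVal_eq_hit k hk v rec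
  rw [h]
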